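-- pv_equiv track=rewrite | github.com/czub0002/FYP | data/correctness_analyser.py | special_char_check
-- ===== SOURCE A (Python) =====
-- import string
--
-- def special_char_check(input_string):
--     spec_char_string = False
--
--     alphabet_chars = set(string.ascii_letters)
--     num_special_chars = sum(1 for char in input_string if char not in alphabet_chars)
--     num_alphabet_chars = sum(1 for char in input_string if char in alphabet_chars)
--
--     # If there are more special characters than non-special characters, return True
--     # Otherwise, return False
--     if num_special_chars > num_alphabet_chars:
--         spec_char_string = True
--
--     return spec_char_string
-- ===== SOURCE B (Python) =====
-- import string
--
-- def special_char_check(input_string):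
--     # Running signed balance: +1 for each non-letter, -1 for each letter.
--     # Specials outnumber letters exactly when the balance ends positive.
--     balance = 0
--     for char in input_string:
--         if ('a' <= char <= 'z') or ('A' <= char <= 'Z'):
--             balance -= 1
--         else:
--             balance += 1
--     return balance > 0
-- ===== Notes on version B (the rewrite author's own statement) =====
-- stated objective: alternative
-- what changed: Replaces A's set construction and two filtered counting passes with a single signed running balance (+1 per special, -1 per letter) whose final sign decides the answer; no counts are ever compared.
import Mathlib
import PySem

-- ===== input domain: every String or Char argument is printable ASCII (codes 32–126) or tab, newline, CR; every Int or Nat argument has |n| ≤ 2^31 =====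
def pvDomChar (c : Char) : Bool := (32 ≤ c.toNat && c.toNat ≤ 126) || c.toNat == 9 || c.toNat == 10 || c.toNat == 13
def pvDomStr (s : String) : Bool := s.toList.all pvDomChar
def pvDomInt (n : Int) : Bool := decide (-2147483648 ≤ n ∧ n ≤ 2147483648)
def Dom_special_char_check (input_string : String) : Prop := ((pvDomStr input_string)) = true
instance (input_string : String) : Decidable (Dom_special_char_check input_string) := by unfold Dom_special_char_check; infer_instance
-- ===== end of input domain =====

-- B replaces A's set build and two filtered counting passes with a single signed
-- running balance (+1 per special char, -1 per letter) whose final sign decides.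

-- ===== PORT A =====
-- string.ascii_letters
def pvAsciiLetters : List Char := "abcdefghijklmnopqrstuvwxyzABCDEFGHIJKLMNOPQRSTUVWXYZ".toList

def special_char_check (input_string : String) : Bool :=
  let spec_char_string := false
  let alphabet_chars : PySem.Set Char := PySem.Set.ofList pvAsciiLetters
  let num_special_chars := (input_string.toList.filter (fun c => !(PySem.Set.contains alphabet_chars c))).length
  let num_alphabet_chars := (input_string.toList.filter (fun c => PySem.Set.contains alphabet_chars c)).length
  if num_special_chars > num_alphabet_chars then true else spec_char_string

-- ===== PORT B =====
def special_char_check_alt (input_string : String) : Bool :=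
  let balance : Int := input_string.toList.foldl
    (fun b c => if ('a' ≤ c ∧ c ≤ 'z') ∨ ('A' ≤ c ∧ c ≤ 'Z') then b - 1 else b + 1) 0
  decide (balance > 0)

-- ===== PRECONDITION & SPEC =====
def Spec_special_char_check (input_string : String) (out : Bool) : Prop := out = special_char_check_alt input_string
instance (input_string : String) (out : Bool) : Decidable (Spec_special_char_check input_string out) := by unfold Spec_special_char_check; infer_instance

-- ===== CLAIM (what is proved, stated in full; the proofs are below) =====
def Claim_equal_special_char_check : Prop := ∀ (input_string : String), Dom_special_char_check input_string → Spec_special_char_check input_string (special_char_check input_string)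

-- ===== LEMMAS AND PROOFS =====

-- membership in the 52 ASCII letters equals B's range test
theorem mem_pvAsciiLetters (c : Char) :
    PySem.Set.contains (PySem.Set.ofList pvAsciiLetters) c
      = decide (('a' ≤ c ∧ c ≤ 'z') ∨ ('A' ≤ c ∧ c ≤ 'Z')) := by
  rw [Bool.eq_iff_iff]
  simp [PySem.Set.mem_ofList, pvAsciiLetters, Char.le_def,
    UInt32.le_iff_toNat_le, Char.ext_iff, UInt32.ext_iff]
  omega

-- B's signed balance equals (#non-letters) − (#letters)
theorem foldl_balance (l : List Char) (b : Int) :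
    l.foldl (fun b c => if ('a' ≤ c ∧ c ≤ 'z') ∨ ('A' ≤ c ∧ c ≤ 'Z') then b - 1 else b + 1) b
      = b + ((l.filter (fun c => !(decide (('a' ≤ c ∧ c ≤ 'z') ∨ ('A' ≤ c ∧ c ≤ 'Z'))))).length : Int)
          - ((l.filter (fun c => decide (('a' ≤ c ∧ c ≤ 'z') ∨ ('A' ≤ c ∧ c ≤ 'Z')))).length : Int) := by
  induction l generalizing b with
  | nil => simp
  | cons x xs ih =>
    simp only [List.foldl_cons, List.filter_cons]
    by_cases h : ('a' ≤ x ∧ x ≤ 'z') ∨ ('A' ≤ x ∧ x ≤ 'Z') <;> simp [h, ih] <;> ring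

-- ===== VERDICT (by name: the statement is the Claim_ definition above) =====
theorem special_char_check_spec : Claim_equal_special_char_check := by
  intro s _
  unfold Spec_special_char_check special_char_check special_char_check_alt
  simp only [mem_pvAsciiLetters, foldl_balance]
  rw [Bool.eq_iff_iff]
  simp only [decide_eq_true_eq]
  constructor <;> intro h
  · split at h
    · omega
    · simp at h
  · split
    · rfl
    · omega
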